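-- pv_equiv track=rewrite | github.com/AdamZhouSE/pythonHomework | Code/CodeRecords/2718/60602/254861.py | exchangeString
-- ===== SOURCE A (Python) =====
-- def exchangeString(list,string):
--     judge=True;
--     i=0;
--     while(i<len(list)):
--         if(string[list[i][0]]>string[list[i][1]]):
--             judge=False;
--             temp=string[list[i][1]];
--             string=string[0:list[i][1]]+string[list[i][0]]+string[list[i][1]+1:];
--             string=string[0:list[i][0]]+temp+string[list[i][0]+1:];
--         i+=1;
--
--     if(judge):
--         return string;
--     else:
--         return exchangeString(list,string);
-- ===== SOURCE B (Python) =====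
-- def exchangeString(list, string):
--     # Fixpoint by pure pass composition: fold one pass over the pairs producing
--     # a fresh list, and stop when a whole pass is the identity (compare the two
--     # lists), instead of tail recursion with a 'judge' flag.
--     def step(chars, a, b):
--         if chars[a] > chars[b]:
--             chars = chars[:]
--             chars[a], chars[b] = chars[b], chars[a]
--         return chars
--     cur = [ch for ch in string]
--     while True:
--         nxt = cur
--         for a, b in list:
--             nxt = step(nxt, a, b)
--         if nxt == cur:
--             return "".join(cur)
--         cur = nxt
-- ===== Notes on version B (the rewrite author's own statement) =====
-- stated objective: alternative
-- what changed: Replaced A's tail recursion over immutable strings rebuilt by four slices per swap (with a 'judge' flag) by an iterative fixpoint that folds a pure swap step over the pairs into a fresh char list and stops when a whole pass returns a list equal to its input.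
-- outside the precondition, e.g. on exchangeString([(0, -1)], 'ba'): A returns 'abba', B returns 'ab'; on exchangeString([(0, 1), (1, 0)], 'ba'): A raises RecursionError, B returns 'ba'
import Mathlib
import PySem

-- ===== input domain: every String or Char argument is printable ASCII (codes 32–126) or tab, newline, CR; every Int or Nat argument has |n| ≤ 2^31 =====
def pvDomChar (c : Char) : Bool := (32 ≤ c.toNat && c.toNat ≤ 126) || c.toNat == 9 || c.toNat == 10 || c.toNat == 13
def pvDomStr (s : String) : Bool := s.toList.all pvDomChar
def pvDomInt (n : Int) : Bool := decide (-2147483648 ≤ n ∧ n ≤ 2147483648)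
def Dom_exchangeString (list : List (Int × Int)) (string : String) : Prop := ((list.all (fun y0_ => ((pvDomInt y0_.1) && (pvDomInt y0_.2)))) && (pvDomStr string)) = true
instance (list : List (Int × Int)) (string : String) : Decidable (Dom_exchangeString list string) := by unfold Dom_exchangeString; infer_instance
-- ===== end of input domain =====

-- B replaces A's tail recursion over slice-rebuilt strings (with a 'judge' flag) by an
-- iterative fixpoint that folds a pure swap step over the pairs and stops when a whole
-- pass returns the same list (objective: alternative decomposition).

-- ===== PORT A =====
-- A's swap: string = string[0:b]+string[a]+string[b+1:]; string = string[0:a]+temp+string[a+1:]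
def pvSwapA (a b : Int) (ca cb : Char) (s : List Char) : List Char :=
  let s1 := PySem.List.slice s (some 0) (some b) ++ [ca] ++ PySem.List.slice s (some (b + 1)) none
  PySem.List.slice s1 (some 0) (some a) ++ [cb] ++ PySem.List.slice s1 (some (a + 1)) none

-- A's while(i<len(list)) indexing list[i]: structural recursion over the pairs,
-- carrying judge and the current string. pyGet? none = IndexError, outside Pre_.
def pvPassA (pairs : List (Int × Int)) (judge : Bool) (s : List Char) : Bool × List Char :=
  match pairs with
  | [] => (judge, s)
  | (a, b) :: rest =>
    match PySem.List.pyGet? s a, PySem.List.pyGet? s b with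
    | some ca, some cb =>
      if cb < ca then pvPassA rest false (pvSwapA a b ca cb s)
      else pvPassA rest judge s
    | _, _ => pvPassA rest judge s

-- A's tail recursion 'if judge: return string else: return exchangeString(list,string)',
-- with a fuel totality guard (n^2+1 passes always suffice inside Pre_).
def pvRunA (fuel : Nat) (pairs : List (Int × Int)) (s : List Char) : List Char :=
  match fuel with
  | 0 => s
  | fuel + 1 =>
    let r := pvPassA pairs true s
    if r.1 then r.2 else pvRunA fuel pairs r.2

def exchangeString (list : List (Int × Int)) (string : String) : String :=
  String.ofList (pvRunA (string.toList.length * string.toList.length + 1) list string.toList)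

-- ===== PORT B =====
-- B's pure step: if chars[a] > chars[b], a fresh list with the two entries swapped.
def pvStepB (chars : List Char) (p : Int × Int) : List Char :=
  match PySem.List.pyGet? chars p.1, PySem.List.pyGet? chars p.2 with
  | some ca, some cb =>
    if cb < ca then PySem.List.pySetD (PySem.List.pySetD chars p.1 cb) p.2 ca
    else chars
  | _, _ => chars

-- B's 'while True: nxt = fold step; if nxt == cur: return', with the same fuel guard.
def pvRunB (fuel : Nat) (pairs : List (Int × Int)) (cur : List Char) : List Char :=
  match fuel with
  | 0 => cur
  | fuel + 1 =>
    let nxt := pairs.foldl pvStepB cur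
    if nxt = cur then cur else pvRunB fuel pairs nxt

def exchangeString_alt (list : List (Int × Int)) (string : String) : String :=
  String.ofList (pvRunB (string.toList.length * string.toList.length + 1) list string.toList)

-- ===== PRECONDITION & SPEC =====
-- Pre_ excludes: pairs with an index out of range (Python A raises IndexError);
-- pairs with a negative in-range index, where A's slice arithmetic rebuilds a
-- longer string instead of swapping (when it returns at all); and lists where an
-- ascending and a descending pair share a position, on which A can recurse
-- forever (RecursionError).
def Pre_exchangeString (list : List (Int × Int)) (string : String) : Prop :=
  (∀ p ∈ list, 0 ≤ p.1 ∧ p.1 < (string.toList.length : Int) ∧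
               0 ≤ p.2 ∧ p.2 < (string.toList.length : Int)) ∧
  (∀ p ∈ list, ∀ q ∈ list, p.1 < p.2 → q.2 < q.1 →
     p.1 ≠ q.1 ∧ p.1 ≠ q.2 ∧ p.2 ≠ q.1 ∧ p.2 ≠ q.2)
instance (list : List (Int × Int)) (string : String) : Decidable (Pre_exchangeString list string) := by unfold Pre_exchangeString; infer_instance

def pvWitness_exchangeString : (List (Int × Int)) × String := ([((0 : Int), (1 : Int))], "ba")

def Spec_exchangeString (list : List (Int × Int)) (string : String) (out : String) : Prop := out = exchangeString_alt list string
instance (list : List (Int × Int)) (string : String) (out : String) : Decidable (Spec_exchangeString list string out) := by unfold Spec_exchangeString; infer_instance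

-- ===== CLAIM (what is proved, stated in full; the proofs are below) =====
def Claim_equal_exchangeString : Prop := ∀ (list : List (Int × Int)) (string : String), Dom_exchangeString list string → Pre_exchangeString list string → Spec_exchangeString list string (exchangeString list string)

-- ===== LEMMAS AND PROOFS =====

-- A's two-slice rebuild at an in-range nonnegative index is List.set.
lemma pvSlice_set (i : Int) (c : Char) (s : List Char) (h0 : 0 ≤ i)
    (h1 : i < (s.length : Int)) :
    PySem.List.slice s (some 0) (some i) ++ [c] ++ PySem.List.slice s (some (i + 1)) none
      = s.set i.toNat c := by
  rw [PySem.List.slice_zero_start, PySem.List.slice_to _ h0, PySem.List.slice_from _ (by omega)]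
  have hlen : i.toNat < s.length := by omega
  have h2 : (i + 1).toNat = i.toNat + 1 := by omega
  rw [h2, List.set_eq_take_append_cons_drop, if_pos hlen]
  simp

-- A's swap equals B's pair of sets (distinct in-range nonnegative indices).
lemma pvSwap_eq (a b : Int) (ca cb : Char) (s : List Char)
    (ha0 : 0 ≤ a) (ha1 : a < (s.length : Int)) (hb0 : 0 ≤ b) (hb1 : b < (s.length : Int))
    (hne : a ≠ b) :
    pvSwapA a b ca cb s = PySem.List.pySetD (PySem.List.pySetD s a cb) b ca := by
  unfold pvSwapA
  rw [pvSlice_set b ca s hb0 hb1]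
  rw [pvSlice_set a cb _ ha0 (by simpa using ha1)]
  rw [PySem.List.pySetD_of_nonneg s cb ha0, PySem.List.pySetD_of_nonneg _ ca hb0]
  exact List.set_comm _ _ (by omega)

lemma pvStepB_len (s : List Char) (p : Int × Int) : (pvStepB s p).length = s.length := by
  unfold pvStepB
  cases PySem.List.pyGet? s p.1 with
  | none => rfl
  | some ca =>
    cases PySem.List.pyGet? s p.2 with
    | none => rfl
    | some cb =>
      by_cases h : cb < ca
      · simp [h, PySem.List.length_pySetD]
      · simp [h]

lemma pvFoldB_len (pairs : List (Int × Int)) (s : List Char) :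
    (pairs.foldl pvStepB s).length = s.length := by
  induction pairs generalizing s with
  | nil => rfl
  | cons p rest ih => rw [List.foldl_cons, ih, pvStepB_len]

-- The string component of A's pass is B's fold of the pure step.
lemma pvPassA_snd (pairs : List (Int × Int)) (j : Bool) (s : List Char)
    (hbd : ∀ p ∈ pairs, 0 ≤ p.1 ∧ p.1 < (s.length : Int) ∧ 0 ≤ p.2 ∧ p.2 < (s.length : Int)) :
    (pvPassA pairs j s).2 = pairs.foldl pvStepB s := by
  induction pairs generalizing j s with
  | nil => rfl
  | cons p rest ih =>
    obtain ⟨a, b⟩ := p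
    obtain ⟨ha0, ha1, hb0, hb1⟩ := hbd (a, b) (List.mem_cons_self ..)
    have hrest : ∀ p ∈ rest, 0 ≤ p.1 ∧ p.1 < (s.length : Int) ∧ 0 ≤ p.2 ∧ p.2 < (s.length : Int) :=
      fun p hp => hbd p (List.mem_cons_of_mem _ hp)
    simp only [pvPassA, List.foldl_cons, pvStepB]
    cases hA : PySem.List.pyGet? s a with
    | none => exact ih j s hrest
    | some ca =>
      cases hB : PySem.List.pyGet? s b with
      | none => exact ih j s hrest
      | some cb =>
        by_cases h : cb < ca
        · simp only [if_pos h]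
          have hne : a ≠ b := by
            intro hEq
            rw [hEq, hB] at hA
            exact absurd (Option.some.inj hA) (by intro hc; rw [hc] at h; exact lt_irrefl _ h)
          rw [pvSwap_eq a b ca cb s ha0 ha1 hb0 hb1 hne]
          have hlen : (PySem.List.pySetD (PySem.List.pySetD s a cb) b ca).length = s.length := by
            simp [PySem.List.length_pySetD]
          exact ih false _ (by rw [hlen]; exact hrest)
        · simp only [if_neg h]; exact ih j s hrest

-- If A's pass ends with judge still true, no swap fired, so B's pass is the identity.
lemma pvPassA_flag_true (pairs : List (Int × Int)) (j : Bool) (s : List Char)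
    (h : (pvPassA pairs j s).1 = true) : j = true ∧ pairs.foldl pvStepB s = s := by
  induction pairs generalizing j s with
  | nil => exact ⟨h, rfl⟩
  | cons p rest ih =>
    obtain ⟨a, b⟩ := p
    simp only [pvPassA, List.foldl_cons, pvStepB] at h ⊢
    cases hA : PySem.List.pyGet? s a with
    | none => rw [hA] at h; exact ih j s h
    | some ca =>
      cases hB : PySem.List.pyGet? s b with
      | none => rw [hA, hB] at h; exact ih j s h
      | some cb =>
        rw [hA, hB] at h
        by_cases hc : cb < ca
        · simp only [if_pos hc] at h
          exact absurd (ih false _ h).1 (by simp)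
        · simp only [if_neg hc] at h ⊢; exact ih j s h

-- If a pass leaves the string unchanged but judge is false, A loops on the same
-- string until its fuel runs out and returns it.
lemma pvRunA_stuck (fuel : Nat) (pairs : List (Int × Int)) (s : List Char)
    (h : pvPassA pairs true s = (false, s)) : pvRunA fuel pairs s = s := by
  induction fuel with
  | zero => rfl
  | succ n ih => simp only [pvRunA, h]; exact ih

lemma pvRun_eq (fuel : Nat) (pairs : List (Int × Int)) (s : List Char)
    (hbd : ∀ p ∈ pairs, 0 ≤ p.1 ∧ p.1 < (s.length : Int) ∧ 0 ≤ p.2 ∧ p.2 < (s.length : Int)) :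
    pvRunA fuel pairs s = pvRunB fuel pairs s := by
  induction fuel generalizing s with
  | zero => rfl
  | succ n ih =>
    have hsnd := pvPassA_snd pairs true s hbd
    simp only [pvRunA, pvRunB]
    cases hflag : (pvPassA pairs true s).1 with
    | true =>
      have hfix := (pvPassA_flag_true pairs true s hflag).2
      simp [hfix, hsnd]
    | false =>
      simp only [Bool.false_eq_true, if_false]
      by_cases hfix : pairs.foldl pvStepB s = s
      · rw [if_pos hfix, hsnd, hfix]
        exact pvRunA_stuck n pairs s (by
          have : pvPassA pairs true s = ((pvPassA pairs true s).1, (pvPassA pairs true s).2) := rfl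
          rw [this, hflag, hsnd, hfix])
      · rw [if_neg hfix, hsnd]
        exact ih _ (by rw [pvFoldB_len]; exact hbd)

-- ===== VERDICT (by name: the statement is the Claim_ definition above) =====
theorem exchangeString_spec : Claim_equal_exchangeString := by
  intro list string _ hpre
  unfold Spec_exchangeString exchangeString exchangeString_alt
  rw [pvRun_eq _ list string.toList hpre.1]
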